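-- pv_equiv track=rewrite | github.com/ohchanju3/Algo-Study | 이상준/10주차/3일차 [BOJ] 2004.py | count_2_5_factorial
-- ===== SOURCE A (Python) =====
-- def count_2_5_factorial(x):
--     count_2 = 0
--     count_5 = 0
--     i = 2
--     j = 5
--     while i <= x:
--         count_2 += x // i
--         i *= 2
--     while j <= x:
--         count_5 += x // j
--         j *= 5
--
--     return count_2, count_5
-- ===== SOURCE B (Python) =====
-- def count_2_5_factorial(x):
--     if x < 2:
--         return 0, 0
--     s2 = 0
--     t = x
--     while t:
--         s2 += t % 2
--         t //= 2
--     s5 = 0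
--     t = x
--     while t:
--         s5 += t % 5
--         t //= 5
--     return x - s2, (x - s5) // 4
-- ===== Notes on version B (the rewrite author's own statement) =====
-- stated objective: alternative
-- what changed: Replaces the two power-of-p summation loops (x//2 + x//4 + ... and x//5 + x//25 + ...) by Legendre's digit-sum identity: count_p = (x - digitsum_p(x)) / (p - 1), computed from one base-2 and one base-5 digit-sum loop over the digits of x.
import Mathlib
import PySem

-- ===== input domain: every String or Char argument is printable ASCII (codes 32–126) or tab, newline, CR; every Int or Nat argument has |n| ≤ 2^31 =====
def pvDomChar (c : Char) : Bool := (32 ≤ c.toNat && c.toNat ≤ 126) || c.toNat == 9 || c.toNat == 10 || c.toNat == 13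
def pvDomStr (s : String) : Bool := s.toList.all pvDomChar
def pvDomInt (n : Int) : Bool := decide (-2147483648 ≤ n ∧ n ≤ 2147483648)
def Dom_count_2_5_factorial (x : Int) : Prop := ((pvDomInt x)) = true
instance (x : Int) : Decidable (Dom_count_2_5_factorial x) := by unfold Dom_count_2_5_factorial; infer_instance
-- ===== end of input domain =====

-- B replaces the two power-of-p summation loops by Legendre's digit-sum identity
-- count_p(x!) = (x - digitsum_p(x)) / (p - 1), one digit-sum loop per prime (objective: a genuinely different algorithm of similar cost).

-- ===== PORT A =====
-- A's first while loop: `while i <= x: count_2 += x // i; i *= 2`.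
-- The `1 ≤ i` conjunct is a totality guard only: i starts at 2 and doubles, so it always holds.
def pvLoopA2 (x i acc : Int) : Int :=
  if _h : 1 ≤ i ∧ i ≤ x then pvLoopA2 x (i * 2) (acc + PySem.Int.floordiv x i) else acc
termination_by (x + 1 - i).toNat
decreasing_by omega

-- A's second while loop: `while j <= x: count_5 += x // j; j *= 5` (same totality guard).
def pvLoopA5 (x j acc : Int) : Int :=
  if _h : 1 ≤ j ∧ j ≤ x then pvLoopA5 x (j * 5) (acc + PySem.Int.floordiv x j) else acc
termination_by (x + 1 - j).toNat
decreasing_by omega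

def count_2_5_factorial (x : Int) : Int × Int :=
  (pvLoopA2 x 2 0, pvLoopA5 x 5 0)

-- ===== PORT B =====
-- B's base-2 digit-sum loop `while t: s2 += t % 2; t //= 2` (t ≥ 0 here, so Nat).
def pvDigitSum2 (n : Nat) : Nat :=
  if n = 0 then 0 else n % 2 + pvDigitSum2 (n / 2)
termination_by n
decreasing_by exact Nat.div_lt_self (Nat.pos_of_ne_zero (by assumption)) (by omega)

-- B's base-5 digit-sum loop.
def pvDigitSum5 (n : Nat) : Nat :=
  if n = 0 then 0 else n % 5 + pvDigitSum5 (n / 5)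
termination_by n
decreasing_by exact Nat.div_lt_self (Nat.pos_of_ne_zero (by assumption)) (by omega)

def count_2_5_factorial_alt (x : Int) : Int × Int :=
  if x < 2 then (0, 0)
  else (x - (pvDigitSum2 x.toNat : Int),
        PySem.Int.floordiv (x - (pvDigitSum5 x.toNat : Int)) 4)

-- ===== PRECONDITION & SPEC =====
def Spec_count_2_5_factorial (x : Int) (out : Int × Int) : Prop := out = count_2_5_factorial_alt x
instance (x : Int) (out : Int × Int) : Decidable (Spec_count_2_5_factorial x out) := by unfold Spec_count_2_5_factorial; infer_instance

-- ===== CLAIM (what is proved, stated in full; the proofs are below) =====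
def Claim_equal_count_2_5_factorial : Prop := ∀ (x : Int), Dom_count_2_5_factorial x → Spec_count_2_5_factorial x (count_2_5_factorial x)

-- ===== LEMMAS AND PROOFS =====

-- Proof-side Nat mirror of A's loops: sum of n / i over i, i*m, i*m², … while i ≤ n.
def pvS (m i n : Nat) : Nat :=
  if h : 2 ≤ m ∧ 1 ≤ i ∧ i ≤ n then n / i + pvS m (i * m) n else 0
termination_by n + 1 - i
decreasing_by
  have h2 : i * 2 ≤ i * m := Nat.mul_le_mul_left i h.1
  omega

lemma pvLoopA2_eq_pvS (n : Nat) :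
    ∀ (k i : Nat), n + 1 - i ≤ k → 1 ≤ i → ∀ acc : Int,
      pvLoopA2 (n : Int) (i : Int) acc = acc + (pvS 2 i n : Int) := by
  intro k
  induction k with
  | zero =>
    intro i hk hi acc
    rw [pvLoopA2, pvS]
    rw [dif_neg (by omega), dif_neg (by omega)]
    simp
  | succ k ih =>
    intro i hk hi acc
    rw [pvLoopA2, pvS]
    by_cases h : i ≤ n
    · rw [dif_pos (by omega), dif_pos (by omega)]
      have hcast : ((i : Int)) * 2 = ((i * 2 : Nat) : Int) := by push_cast; ring
      rw [hcast, PySem.Int.floordiv_natCast n i,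
        ih (i * 2) (by omega) (by omega) (acc + ((n / i : Nat) : Int))]
      push_cast; ring
    · rw [dif_neg (by omega), dif_neg (by omega)]
      simp

lemma pvLoopA5_eq_pvS (n : Nat) :
    ∀ (k j : Nat), n + 1 - j ≤ k → 1 ≤ j → ∀ acc : Int,
      pvLoopA5 (n : Int) (j : Int) acc = acc + (pvS 5 j n : Int) := by
  intro k
  induction k with
  | zero =>
    intro j hk hj acc
    rw [pvLoopA5, pvS]
    rw [dif_neg (by omega), dif_neg (by omega)]
    simp
  | succ k ih =>
    intro j hk hj acc
    rw [pvLoopA5, pvS]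
    by_cases h : j ≤ n
    · rw [dif_pos (by omega), dif_pos (by omega)]
      have hcast : ((j : Int)) * 5 = ((j * 5 : Nat) : Int) := by push_cast; ring
      rw [hcast, PySem.Int.floordiv_natCast n j,
        ih (j * 5) (by omega) (by omega) (acc + ((n / j : Nat) : Int))]
      push_cast; ring
    · rw [dif_neg (by omega), dif_neg (by omega)]
      simp

-- Shifting the starting power: summing from i*m over x is summing from i over x/m.
lemma pvS_shift (m : Nat) (hm : 2 ≤ m) :
    ∀ (k n i : Nat), n + 1 - i ≤ k → 1 ≤ i → pvS m (i * m) n = pvS m i (n / m) := by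
  intro k
  induction k with
  | zero =>
    intro n i hk hi
    have h1 : i ≤ i * m := Nat.le_mul_of_pos_right i (by omega)
    have h2 : n / m ≤ n := Nat.div_le_self n m
    conv_lhs => rw [pvS]
    conv_rhs => rw [pvS]
    rw [dif_neg (by omega), dif_neg (by omega)]
  | succ k ih =>
    intro n i hk hi
    have h1 : i ≤ i * m := Nat.le_mul_of_pos_right i (by omega)
    have him : i * 2 ≤ i * m := Nat.mul_le_mul_left i hm
    have hiff : i * m ≤ n ↔ i ≤ n / m := (Nat.le_div_iff_mul_le (by omega)).symm
    conv_lhs => rw [pvS]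
    conv_rhs => rw [pvS]
    by_cases h : i * m ≤ n
    · rw [dif_pos ⟨hm, by omega, h⟩, dif_pos ⟨hm, hi, hiff.1 h⟩]
      have hdd : n / (i * m) = n / m / i := by
        rw [Nat.div_div_eq_div_mul, Nat.mul_comm]
      rw [hdd, ih n (i * m) (by omega) (by omega)]
    · rw [dif_neg (by tauto), dif_neg (fun hc => h (hiff.2 hc.2.2))]

-- pvS m m n satisfies the "one level down" recurrence.
lemma pvS_rec (m : Nat) (hm : 2 ≤ m) (n : Nat) :
    pvS m m n = n / m + pvS m m (n / m) := by
  by_cases h : m ≤ n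
  · conv_lhs => rw [pvS]
    rw [dif_pos ⟨hm, by omega, h⟩, pvS_shift m hm (n + 1) n m (by omega) (by omega)]
  · have h1 : n / m = 0 := Nat.div_eq_of_lt (by omega)
    rw [h1]
    conv_lhs => rw [pvS]
    conv_rhs => rw [pvS]
    rw [dif_neg (by omega), dif_neg (by omega)]

-- Legendre: (m-1) * Σ_{k≥1} n/m^k = n - digitsum_m(n), for any digit-sum function ds.
lemma pvS_legendre (m : Nat) (hm : 2 ≤ m) (ds : Nat → Nat) (hds0 : ds 0 = 0)
    (hds : ∀ n, n ≠ 0 → ds n = n % m + ds (n / m)) :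
    ∀ n, ds n ≤ n ∧ (m - 1) * pvS m m n = n - ds n := by
  intro n
  induction n using Nat.strong_induction_on with
  | _ n ih =>
    rcases Nat.eq_zero_or_pos n with h0 | h0
    · subst h0
      rw [hds0, pvS, dif_neg (by omega)]
      simp
    · have hlt : n / m < n := Nat.div_lt_self h0 (by omega)
      obtain ⟨hle, heq⟩ := ih (n / m) hlt
      have hrec := pvS_rec m hm n
      have hdsn := hds n (by omega)
      have hmod : m * (n / m) + n % m = n := Nat.div_add_mod n m
      have hdistr : (m - 1) * (n / m + pvS m m (n / m))
          = (m - 1) * (n / m) + (m - 1) * pvS m m (n / m) := Nat.mul_add _ _ _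
      have hsum : (m - 1) * (n / m) + 1 * (n / m) = m * (n / m) := by
        rw [← Nat.add_mul, Nat.sub_add_cancel (by omega)]
      rw [hrec, hdistr, heq, hdsn]
      omega

lemma pvDigitSum2_rec (n : Nat) (h : n ≠ 0) : pvDigitSum2 n = n % 2 + pvDigitSum2 (n / 2) := by
  rw [pvDigitSum2, if_neg h]

lemma pvDigitSum5_rec (n : Nat) (h : n ≠ 0) : pvDigitSum5 n = n % 5 + pvDigitSum5 (n / 5) := by
  rw [pvDigitSum5, if_neg h]

lemma pvLegendre2 (n : Nat) : pvDigitSum2 n ≤ n ∧ pvS 2 2 n = n - pvDigitSum2 n := by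
  have := pvS_legendre 2 (by omega) pvDigitSum2 (by rw [pvDigitSum2]; simp) pvDigitSum2_rec n
  omega

lemma pvLegendre5 (n : Nat) : pvDigitSum5 n ≤ n ∧ 4 * pvS 5 5 n = n - pvDigitSum5 n := by
  have := pvS_legendre 5 (by omega) pvDigitSum5 (by rw [pvDigitSum5]; simp) pvDigitSum5_rec n
  omega

-- ===== VERDICT (by name: the statement is the Claim_ definition above) =====
theorem count_2_5_factorial_spec : Claim_equal_count_2_5_factorial := by
  intro x _hdom
  unfold Spec_count_2_5_factorial count_2_5_factorial count_2_5_factorial_alt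
  by_cases hx : x < 2
  · rw [if_pos hx, pvLoopA2, pvLoopA5, dif_neg (by omega), dif_neg (by omega)]
  · rw [if_neg hx]
    set n := x.toNat with hn
    have hxn : x = (n : Int) := by omega
    obtain ⟨h2le, h2eq⟩ := pvLegendre2 n
    obtain ⟨h5le, h5eq⟩ := pvLegendre5 n
    have hA2 : pvLoopA2 x 2 0 = ((pvS 2 2 n : Nat) : Int) := by
      rw [hxn]
      have := pvLoopA2_eq_pvS n (n + 1) 2 (by omega) (by omega) 0
      push_cast at this ⊢
      rw [this]; ring
    have hA5 : pvLoopA5 x 5 0 = ((pvS 5 5 n : Nat) : Int) := by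
      rw [hxn]
      have := pvLoopA5_eq_pvS n (n + 1) 5 (by omega) (by omega) 0
      push_cast at this ⊢
      rw [this]; ring
    have hB5 : x - (pvDigitSum5 n : Int) = ((4 * pvS 5 5 n : Nat) : Int) := by
      rw [hxn]; push_cast; omega
    rw [hA2, hA5, hB5, h2eq, PySem.Int.floordiv_eq_ediv_of_pos (by omega), Prod.mk.injEq]
    constructor
    · rw [hxn]; omega
    · push_cast
      rw [Int.mul_ediv_cancel_left _ (by omega)]
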